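-- pv_equiv track=rewrite | github.com/pscl4rke/yahtzee | card.py | straight_prefix_of
-- ===== SOURCE A (Python) =====
-- def straight_prefix_of(ordered_set):
--     prefix = [ordered_set[0]]
--     suffix = ordered_set[1:]
--     for element in suffix:
--         if element != (prefix[-1] + 1):
--             break
--         else:
--             prefix.append(element)
--     return prefix
-- ===== SOURCE B (Python) =====
-- def straight_prefix_of(ordered_set):
--     # Find the first break in the +1 chain by scanning adjacent pairs, then slice once.
--     n = len(ordered_set)
--     for i, (a, b) in enumerate(zip(ordered_set, ordered_set[1:]), 1):
--         if b != a + 1: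
--             n = i
--             break
--     return list(ordered_set[:n])
-- ===== Notes on version B (the rewrite author's own statement) =====
-- stated objective: simpler
-- what changed: Instead of growing a prefix list element by element while reading its last item, B scans adjacent pairs to find the first break index and returns a single slice.
-- crash fix: A raises IndexError on the empty list (it reads ordered_set[0]); B returns []. — e.g. on straight_prefix_of([]): A raises IndexError, B returns []
import Mathlib
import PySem

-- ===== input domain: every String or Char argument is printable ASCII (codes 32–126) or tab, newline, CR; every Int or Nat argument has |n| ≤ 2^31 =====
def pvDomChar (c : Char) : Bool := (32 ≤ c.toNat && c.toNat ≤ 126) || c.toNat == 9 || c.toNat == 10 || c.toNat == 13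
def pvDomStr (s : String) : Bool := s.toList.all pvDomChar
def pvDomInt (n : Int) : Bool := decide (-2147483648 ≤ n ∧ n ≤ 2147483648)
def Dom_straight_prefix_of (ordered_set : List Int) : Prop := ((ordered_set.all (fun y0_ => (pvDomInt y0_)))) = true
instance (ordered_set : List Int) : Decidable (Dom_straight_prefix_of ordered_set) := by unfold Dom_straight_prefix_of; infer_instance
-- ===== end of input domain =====

-- B replaces A's grow-a-prefix-while-reading-its-last-element loop by finding the
-- first break index over adjacent pairs and slicing once (objective: simpler).

-- ===== PORT A =====
-- the for/break loop of A: append while the chain continues, stop at the first break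
def spGoA (pre : List Int) (suffix : List Int) : List Int :=
  match suffix with
  | [] => pre
  | e :: rest =>
    if e ≠ PySem.List.pyGetD pre (-1) 0 + 1 then pre
    else spGoA (pre ++ [e]) rest

def straight_prefix_of (ordered_set : List Int) : List Int :=
  match ordered_set with
  | [] => []   -- Python raises IndexError on ordered_set[0]; excluded by Pre_
  | x :: _ => spGoA [x] (PySem.List.slice ordered_set (some 1) none)

-- ===== PORT B =====
-- Source B's loop over enumerate(zip(l, l[1:]), 1): return the break index i, else n
def spbLoop (pairs : List (Int × Int)) (i : Int) (n : Int) : Int :=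
  match pairs with
  | [] => n
  | (a, b) :: rest => if b ≠ a + 1 then i else spbLoop rest (i + 1) n

def straight_prefix_of_alt (ordered_set : List Int) : List Int :=
  let n := spbLoop (ordered_set.zip (PySem.List.slice ordered_set (some 1) none)) 1
             (ordered_set.length : Int)
  PySem.List.slice ordered_set none (some n)

-- ===== PRECONDITION & SPEC =====
-- Pre_ excludes only the empty list, on which A raises IndexError.
def Pre_straight_prefix_of (ordered_set : List Int) : Prop := ordered_set ≠ []
instance (ordered_set : List Int) : Decidable (Pre_straight_prefix_of ordered_set) := by
  unfold Pre_straight_prefix_of; infer_instance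
def pvWitness_straight_prefix_of : List Int := [3, 4, 5, 9]

-- A raises IndexError on the empty list (it reads ordered_set[0]); B returns [].
def Raises_straight_prefix_of (ordered_set : List Int) : Prop := ordered_set = []
instance (ordered_set : List Int) : Decidable (Raises_straight_prefix_of ordered_set) := by
  unfold Raises_straight_prefix_of; infer_instance
def pvRaiseWitness_straight_prefix_of : List Int := []
def pvRaiseWitnessOut_straight_prefix_of : List Int := []

def Spec_straight_prefix_of (ordered_set : List Int) (out : List Int) : Prop :=
  out = straight_prefix_of_alt ordered_set
instance (ordered_set : List Int) (out : List Int) : Decidable (Spec_straight_prefix_of ordered_set out) := by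
  unfold Spec_straight_prefix_of; infer_instance

-- ===== CLAIM (what is proved, stated in full; the proofs are below) =====
def Claim_equal_straight_prefix_of : Prop := ∀ (ordered_set : List Int),
  Dom_straight_prefix_of ordered_set → Pre_straight_prefix_of ordered_set →
  Spec_straight_prefix_of ordered_set (straight_prefix_of ordered_set)

def Claim_raises_straight_prefix_of : Prop :=
  (∀ (ordered_set : List Int), Dom_straight_prefix_of ordered_set →
    Raises_straight_prefix_of ordered_set → ¬ Pre_straight_prefix_of ordered_set) ∧
  (Dom_straight_prefix_of (pvRaiseWitness_straight_prefix_of) ∧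
   Raises_straight_prefix_of (pvRaiseWitness_straight_prefix_of) ∧
   straight_prefix_of_alt (pvRaiseWitness_straight_prefix_of) = pvRaiseWitnessOut_straight_prefix_of)

-- ===== LEMMAS AND PROOFS =====

-- the common characterisation: the maximal +1-chain continuation after a
def chain (a : Int) : List Int → List Int
  | [] => []
  | e :: r => if e = a + 1 then e :: chain e r else []

theorem spGoA_eq (s : List Int) : ∀ (acc : List Int) (a : Int),
    spGoA (acc ++ [a]) s = acc ++ [a] ++ chain a s := by
  induction s with
  | nil => intro acc a; simp [spGoA, chain]
  | cons e rest ih =>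
    intro acc a
    simp only [spGoA, chain, PySem.List.pyGetD_neg_one_append_singleton]
    by_cases h : e = a + 1
    · subst h
      have := ih (acc ++ [a]) (a + 1)
      simpa using this
    · simp [h]

theorem take_chain_length (s : List Int) : ∀ a, s.take (chain a s).length = chain a s := by
  induction s with
  | nil => intro a; simp [chain]
  | cons e rest ih =>
    intro a
    by_cases h : e = a + 1 <;> simp [chain, h]
    subst h; exact ih (a + 1)

theorem spbLoop_eq (r : List Int) : ∀ (x : Int) (i : Int),
    spbLoop ((x :: r).zip r) i (i + (r.length : Int)) = i + ((chain x r).length : Int) := by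
  induction r with
  | nil => intro x i; simp [spbLoop, chain]
  | cons b r' ih =>
    intro x i
    simp only [List.zip_cons_cons, spbLoop]
    by_cases h : b = x + 1
    · have heq : i + ((b :: r').length : Int) = (i + 1) + (r'.length : Int) := by
        simp; ring
      rw [heq, ih b (i + 1)]
      simp [chain, h]; ring
    · simp [chain, h]

theorem straight_prefix_of_spec : Claim_equal_straight_prefix_of := by
  intro l _ hpre
  unfold Spec_straight_prefix_of
  match l with
  | [] => exact absurd rfl hpre
  | x :: r =>
    unfold straight_prefix_of straight_prefix_of_alt
    rw [PySem.List.slice_from_one]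
    simp only [List.tail_cons]
    have hA : spGoA ([] ++ [x]) r = [] ++ [x] ++ chain x r := spGoA_eq r [] x
    simp only [List.nil_append] at hA
    have hn : spbLoop ((x :: r).zip r) 1 ((x :: r).length : Int)
        = 1 + ((chain x r).length : Int) := by
      have := spbLoop_eq r x 1
      simpa [add_comm] using this
    rw [hA, hn]
    have h1 : (1 : Int) + ((chain x r).length : Int) = (((chain x r).length + 1 : Nat) : Int) := by
      push_cast; ring
    rw [h1, PySem.List.slice_to_natCast]
    simp [List.take_succ_cons, take_chain_length r x]

theorem straight_prefix_of_raises : Claim_raises_straight_prefix_of := by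
  unfold Claim_raises_straight_prefix_of
  exact ⟨fun l _ hr => by unfold Pre_straight_prefix_of Raises_straight_prefix_of at *; simp [hr], by decide⟩

-- self-check: the crash-fix claim above is exactly what straight_prefix_of_raises proves
theorem straight_prefix_of_raises_ok :
    straight_prefix_of_alt pvRaiseWitness_straight_prefix_of = pvRaiseWitnessOut_straight_prefix_of :=
  (straight_prefix_of_raises).2.2.2
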